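-- pv_equiv track=rewrite | github.com/jiaola/usaco | guide/moocrypt/moocrypt.py | count
-- ===== SOURCE A (Python) =====
-- def count(t, m, o):
--     if m == o or m == 'M' or o == 'O':
--         return 0
--     moo = m + o + o
--     oom = o + o + m
--     c = 0
--     for i in t:
--         c += i.count(moo)
--         c += i.count(oom)
--
--     nrow = len(t)
--     ncol = len(t[0])
--
--     for i in range(ncol):
--         s = ''
--         for j in t:
--             s += j[i]
--         c += s.count(moo)
--         c += s.count(oom)
--
--     # diagnols
--     for i in range(nrow + ncol - 1):
--         s = ''
--         for j in range(nrow):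
--             if i >= j and i - j < ncol:
--                 s += t[j][i-j]
--         c += s.count(moo)
--         c += s.count(oom)
--
--     for i in range(1-nrow, ncol):
--         s = ''
--         for j in range(nrow):
--             if 0 <= i+j < ncol:
--                 s += t[j][i+j]
--         c += s.count(moo)
--         c += s.count(oom)
--
--     return c
-- ===== SOURCE B (Python) =====
-- def count(t, m, o):
--     if m == o or m == 'M' or o == 'O':
--         return 0
--     nrow = len(t)
--     ncol = len(t[0])
--     total = 0
--     for r in range(nrow):
--         row = t[r]
--         for j in range(len(row) - 2):
--             total += (row[j] == m and row[j+1] == o and row[j+2] == o) + \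
--                      (row[j] == o and row[j+1] == o and row[j+2] == m)
--     for j in range(ncol):
--         for r in range(nrow - 2):
--             total += (t[r][j] == m and t[r+1][j] == o and t[r+2][j] == o) + \
--                      (t[r][j] == o and t[r+1][j] == o and t[r+2][j] == m)
--     for r in range(nrow - 2):
--         for j in range(2, ncol):
--             total += (t[r][j] == m and t[r+1][j-1] == o and t[r+2][j-2] == o) + \
--                      (t[r][j] == o and t[r+1][j-1] == o and t[r+2][j-2] == m)
--         for j in range(ncol - 2):
--             total += (t[r][j] == m and t[r+1][j+1] == o and t[r+2][j+2] == o) + \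
--                      (t[r][j] == o and t[r+1][j+1] == o and t[r+2][j+2] == m)
--     return total
-- ===== Notes on version B (the rewrite author's own statement) =====
-- stated objective: faster
-- what changed: B replaces A's line extraction (building every row/column/diagonal string by repeated concatenation and counting the two patterns in each with str.count) by a single per-cell grid scan that tests the 3-cell window starting at each cell in each of the four directions directly, never materialising a line.
-- outside the precondition, e.g. on count(['aaaaa'], 'a', 'aa'): A returns 2, B returns 0
import Mathlib
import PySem

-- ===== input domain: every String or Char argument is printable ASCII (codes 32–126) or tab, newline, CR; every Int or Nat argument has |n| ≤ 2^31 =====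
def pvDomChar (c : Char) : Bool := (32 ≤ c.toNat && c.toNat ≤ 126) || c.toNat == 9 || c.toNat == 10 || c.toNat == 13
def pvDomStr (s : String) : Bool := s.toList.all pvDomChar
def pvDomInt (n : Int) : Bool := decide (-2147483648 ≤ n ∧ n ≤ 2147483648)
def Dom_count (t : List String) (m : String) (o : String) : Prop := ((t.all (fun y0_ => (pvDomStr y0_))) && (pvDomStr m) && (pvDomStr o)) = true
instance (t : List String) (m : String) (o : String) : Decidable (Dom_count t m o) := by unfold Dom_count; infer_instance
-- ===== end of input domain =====

-- B replaces A's line extraction (building every row/column/diagonal string and counting the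
-- patterns in each with str.count) by a single per-cell grid scan that tests the 3-cell window
-- starting at each cell in each of the four directions directly on the grid.

-- shared indexing helpers: `pyCh cs i` is the one-char string cs[i] (empty only where Python raises,
-- which Pre_count excludes); `pyChAt t j k` is t[j][k]
def pyCh (cs : List Char) (i : Int) : List Char :=
  match PySem.List.pyGet? cs i with
  | some c => [c]
  | none => []

def pyChAt (t : List String) (j k : Int) : List Char :=
  match PySem.List.pyGet? t j with
  | some r => pyCh r.toList k
  | none => []

-- ===== PORT A =====
def count (t : List String) (m : String) (o : String) : Int :=
  if m == o || m == "M" || o == "O" then 0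
  else
    let moo := m.toList ++ o.toList ++ o.toList
    let oom := o.toList ++ o.toList ++ m.toList
    let c : Int := t.foldl (fun c i => c + (PySem.Chars.count i.toList moo : Int) + (PySem.Chars.count i.toList oom : Int)) 0
    let nrow : Int := (t.length : Int)
    let ncol : Int := (((PySem.List.pyGet? t 0).getD "").toList.length : Int)
    let c := (PySem.List.pyRange 0 ncol).foldl (fun c i =>
        let s := t.foldl (fun s j => s ++ pyCh j.toList i) ([] : List Char)
        c + (PySem.Chars.count s moo : Int) + (PySem.Chars.count s oom : Int)) c
    let c := (PySem.List.pyRange 0 (nrow + ncol - 1)).foldl (fun c i =>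
        let s := (PySem.List.pyRange 0 nrow).foldl (fun s j =>
            if i ≥ j ∧ i - j < ncol then s ++ pyChAt t j (i - j) else s) ([] : List Char)
        c + (PySem.Chars.count s moo : Int) + (PySem.Chars.count s oom : Int)) c
    let c := (PySem.List.pyRange (1 - nrow) ncol).foldl (fun c i =>
        let s := (PySem.List.pyRange 0 nrow).foldl (fun s j =>
            if 0 ≤ i + j ∧ i + j < ncol then s ++ pyChAt t j (i + j) else s) ([] : List Char)
        c + (PySem.Chars.count s moo : Int) + (PySem.Chars.count s oom : Int)) c
    c

-- ===== PORT B =====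
-- per-cell window scan: rows, then columns, then the two diagonal directions
def count_alt (t : List String) (m : String) (o : String) : Int :=
  if m == o || m == "M" || o == "O" then 0
  else
    let nrow : Int := (t.length : Int)
    let ncol : Int := (((PySem.List.pyGet? t 0).getD "").toList.length : Int)
    let total : Int := (PySem.List.pyRange 0 nrow).foldl (fun total r =>
        let row := (PySem.List.pyGetD t r "").toList
        (PySem.List.pyRange 0 ((row.length : Int) - 2)).foldl (fun total j =>
            total + (if pyCh row j = m.toList ∧ pyCh row (j+1) = o.toList ∧ pyCh row (j+2) = o.toList then 1 else 0)
                  + (if pyCh row j = o.toList ∧ pyCh row (j+1) = o.toList ∧ pyCh row (j+2) = m.toList then 1 else 0)) total) 0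
    let total := (PySem.List.pyRange 0 ncol).foldl (fun total j =>
        (PySem.List.pyRange 0 (nrow - 2)).foldl (fun total r =>
            total + (if pyChAt t r j = m.toList ∧ pyChAt t (r+1) j = o.toList ∧ pyChAt t (r+2) j = o.toList then 1 else 0)
                  + (if pyChAt t r j = o.toList ∧ pyChAt t (r+1) j = o.toList ∧ pyChAt t (r+2) j = m.toList then 1 else 0)) total) total
    let total := (PySem.List.pyRange 0 (nrow - 2)).foldl (fun total r =>
        let total := (PySem.List.pyRange 2 ncol).foldl (fun total j =>
            total + (if pyChAt t r j = m.toList ∧ pyChAt t (r+1) (j-1) = o.toList ∧ pyChAt t (r+2) (j-2) = o.toList then 1 else 0)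
                  + (if pyChAt t r j = o.toList ∧ pyChAt t (r+1) (j-1) = o.toList ∧ pyChAt t (r+2) (j-2) = m.toList then 1 else 0)) total
        (PySem.List.pyRange 0 (ncol - 2)).foldl (fun total j =>
            total + (if pyChAt t r j = m.toList ∧ pyChAt t (r+1) (j+1) = o.toList ∧ pyChAt t (r+2) (j+2) = o.toList then 1 else 0)
                  + (if pyChAt t r j = o.toList ∧ pyChAt t (r+1) (j+1) = o.toList ∧ pyChAt t (r+2) (j+2) = m.toList then 1 else 0)) total) total
    total

-- ===== PRECONDITION & SPEC =====
-- Pre_count excludes (i) inputs where A raises IndexError (empty grid, or a row shorter than row 0,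
-- reached whenever the early-return guard does not fire) and (ii) inputs whose m or o is not a single
-- character AND whose grid is large enough to contain the concatenated pattern: the cipher symbols of
-- the task are single letters, and on longer symbols B's 3-cell window scan does not apply (A then
-- returns a value B does not match); on grids too small to contain the pattern both return 0.
def Pre_count (t : List String) (m : String) (o : String) : Prop :=
  (m = o ∨ m = "M" ∨ o = "O") ∨
  (t ≠ [] ∧ (∀ r ∈ t, (t.headD "").toList.length ≤ r.toList.length) ∧
   ((m.toList.length = 1 ∧ o.toList.length = 1) ∨
    ((∀ r ∈ t, r.toList.length < m.toList.length + 2 * o.toList.length) ∧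
     t.length < m.toList.length + 2 * o.toList.length)))
instance (t : List String) (m : String) (o : String) : Decidable (Pre_count t m o) := by
  unfold Pre_count; infer_instance

def pvWitness_count : List String × String × String := (["Xmm", "mXm", "mmX"], "X", "m")

def Spec_count (t : List String) (m : String) (o : String) (out : Int) : Prop := out = count_alt t m o
instance (t : List String) (m : String) (o : String) (out : Int) : Decidable (Spec_count t m o out) := by unfold Spec_count; infer_instance

-- ===== CLAIM (what is proved, stated in full; the proofs are below) =====
def Claim_equal_count : Prop := ∀ (t : List String) (m : String) (o : String), Dom_count t m o → Pre_count t m o → Spec_count t m o (count t m o)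

-- ===== LEMMAS AND PROOFS =====

-- total cell accessor used only by the proofs: the character at t[r][c] (default-padded)
def gAt (t : List String) (r c : Int) : Char :=
  PySem.List.pyGetD (PySem.List.pyGetD t r "").toList c '?'

-- number of index positions at which the 3-char pattern [a,b,c] occurs in a list
def win3 (a b c : Char) : List Char → Nat
  | x :: y :: z :: rest => (if x = a ∧ y = b ∧ z = c then 1 else 0) + win3 a b c (y :: z :: rest)
  | _ => 0

-- filtering an integer range by an interval test keeps exactly a sub-range
theorem filter_pyRange_interval_aux (c d : Int) : ∀ (n : Nat) (a b : Int), (b - a).toNat ≤ n →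
    (PySem.List.pyRange a b).filter (fun j => decide (c ≤ j ∧ j < d)) =
      PySem.List.pyRange (max a c) (min b d) := by
  intro n
  induction n with
  | zero =>
    intro a b h
    have h1 : b ≤ a := by omega
    have h2 : min b d ≤ max a c := by omega
    rw [PySem.List.pyRange_one_eq_nil h1, List.filter_nil, PySem.List.pyRange_one_eq_nil h2]
  | succ n ih =>
    intro a b h
    by_cases hab : a < b
    · rw [PySem.List.pyRange_one_cons hab, List.filter_cons]
      by_cases hc : c ≤ a ∧ a < d
      · rw [if_pos (by simpa using hc), ih (a + 1) b (by omega)]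
        have h1 : max a c = a := by omega
        have h2 : max (a + 1) c = a + 1 := by omega
        rw [h1, h2, PySem.List.pyRange_one_cons (show a < min b d by omega)]
      · rw [if_neg (by simpa using hc), ih (a + 1) b (by omega)]
        by_cases hca : a < c
        · have h1 : max a c = c := by omega
          have h2 : max (a + 1) c = c := by omega
          rw [h1, h2]
        · have h1 : min b d ≤ max (a + 1) c := by omega
          have h2 : min b d ≤ max a c := by omega
          rw [PySem.List.pyRange_one_eq_nil h1, PySem.List.pyRange_one_eq_nil h2]
    · have h1 : b ≤ a := by omega
      have h2 : min b d ≤ max a c := by omega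
      rw [PySem.List.pyRange_one_eq_nil h1, List.filter_nil, PySem.List.pyRange_one_eq_nil h2]

theorem filter_pyRange_interval (c d a b : Int) :
    (PySem.List.pyRange a b).filter (fun j => decide (c ≤ j ∧ j < d)) =
      PySem.List.pyRange (max a c) (min b d) :=
  filter_pyRange_interval_aux c d (b - a).toNat a b le_rfl

-- a guarded character-append loop over all row indices builds the same line as the
-- flatten of the valid sub-range
theorem diag_line_eq (t : List String) (nrow c d : Int) (f : Int → Int)
    (P : Int → Prop) [DecidablePred P] (hP : ∀ j, P j ↔ c ≤ j ∧ j < d) :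
    (PySem.List.pyRange 0 nrow).foldl
        (fun s j => if P j then s ++ pyChAt t j (f j) else s) ([] : List Char) =
      ((PySem.List.pyRange (max 0 c) (min nrow d)).map (fun j => pyChAt t j (f j))).flatten := by
  rw [PySem.List.foldl_ite_eq_foldl_filter P (fun s j => s ++ pyChAt t j (f j)),
      List.filter_congr (fun x _ => decide_eq_decide.mpr (hP x)),
      filter_pyRange_interval, PySem.List.foldl_append_eq_flatMap, List.nil_append,
      List.flatMap_def]

-- a 'c += X(x); c += Y(x)' loop is a sum over the per-element contributions
theorem foldl_add2 {β : Type} (l : List β) (f g : β → Int) (a : Int) :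
    l.foldl (fun acc x => acc + f x + g x) a = a + (l.map (fun x => f x + g x)).sum := by
  rw [PySem.List.foldl_congr_mem l _ (fun acc x => acc + (f x + g x)) a
      (by intro acc x _; ring), PySem.List.foldl_add]

-- === str.count = window count, for a 3-char pattern whose first and last characters differ ===
theorem win3_short (a b c : Char) (l : List Char) (h : l.length ≤ 2) : win3 a b c l = 0 := by
  match l with
  | [] => rfl
  | [x] => rfl
  | [x, y] => rfl
  | x :: y :: z :: rest => simp at h

theorem count_go_win3 (a b c : Char) (hac : a ≠ c) :
    ∀ (fuel : Nat) (s : List Char) (acc : Nat), s.length ≤ fuel →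
    PySem.Chars.count.go [a, b, c] fuel s acc = acc + win3 a b c s := by
  intro fuel
  induction fuel with
  | zero =>
    intro s acc h
    have hs : s = [] := by cases s <;> simp_all
    subst hs
    rw [PySem.Chars.count.go]
    simp [win3]
  | succ n ih =>
    intro s acc h
    cases s with
    | nil =>
      rw [PySem.Chars.count.go]
      simp [win3]
      omega
    | cons x t =>
      rw [PySem.Chars.count.go]
      by_cases hp : [a, b, c].isPrefixOf (x :: t) = true
      · rw [if_pos hp]
        obtain ⟨hx, t', ht⟩ : a = x ∧ ∃ t', t = b :: c :: t' := by
          cases t with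
          | nil => simp [List.isPrefixOf] at hp
          | cons y t2 =>
            cases t2 with
            | nil => simp [List.isPrefixOf] at hp
            | cons z t3 =>
              simp [List.isPrefixOf] at hp
              obtain ⟨h1, h2, h3⟩ := hp
              exact ⟨h1, t3, by rw [h2, h3]⟩
        subst ht
        subst hx
        have hd : List.drop [a,b,c].length (a :: b :: c :: t') = t' := by simp
        rw [hd, ih t' (acc + 1) (by simp at h ⊢; omega)]
        have h1 : win3 a b c (a :: b :: c :: t') = 1 + win3 a b c (b :: c :: t') := by
          simp [win3]
        have h2 : win3 a b c (b :: c :: t') = win3 a b c t' := by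
          cases t' with
          | nil => simp [win3]
          | cons d t2 =>
            have e1 : win3 a b c (b :: c :: d :: t2) = win3 a b c (c :: d :: t2) := by
              rw [win3]
              have : ¬ (b = a ∧ c = b ∧ d = c) := by
                rintro ⟨hba, hcb, _⟩; exact hac (hba ▸ hcb ▸ rfl)
              rw [if_neg this]; omega
            have e2 : win3 a b c (c :: d :: t2) = win3 a b c (d :: t2) := by
              cases t2 with
              | nil => simp [win3]
              | cons e t3 =>
                rw [win3]
                have : ¬ (c = a ∧ d = b ∧ e = c) := by
                  rintro ⟨hca, _, _⟩; exact hac hca.symm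
                rw [if_neg this]
                omega
            rw [e1, e2]
        rw [h1, h2]
        omega
      · rw [if_neg hp, ih t acc (by simp at h; omega)]
        have : win3 a b c (x :: t) = win3 a b c t := by
          cases t with
          | nil => simp [win3]
          | cons y t2 =>
            cases t2 with
            | nil => simp [win3]
            | cons z t3 =>
              have : ¬ (x = a ∧ y = b ∧ z = c) := by
                rintro ⟨h1, h2, h3⟩
                apply hp
                subst h1; subst h2; subst h3
                simp [List.isPrefixOf]
              rw [win3, if_neg this]
              omega
        rw [this]

theorem count_eq_win3 (a b c : Char) (hac : a ≠ c) (s : List Char) :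
    PySem.Chars.count s [a, b, c] = win3 a b c s := by
  rw [PySem.Chars.count]
  simp only [List.isEmpty_cons, Bool.false_eq_true, if_false]
  simpa using count_go_win3 a b c hac s.length s 0 le_rfl

-- === sum toolkit ===
theorem sum_map_filter_of_zero (f : Int → Int) (q : Int → Bool) :
    ∀ (L : List Int), (∀ x ∈ L, q x = false → f x = 0) →
    (L.map f).sum = ((L.filter q).map f).sum := by
  intro L
  induction L with
  | nil => intro _; rfl
  | cons x L ih =>
    intro h
    rw [List.map_cons, List.sum_cons, List.filter_cons]
    by_cases hq : q x = true
    · rw [if_pos hq, List.map_cons, List.sum_cons, ih (fun y hy => h y (List.mem_cons_of_mem x hy))]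
    · rw [if_neg hq, h x List.mem_cons_self (by simpa using hq),
        ih (fun y hy => h y (List.mem_cons_of_mem x hy)), zero_add]

theorem sum_pyRange_congr (f : Int → Int) {A B c d : Int} (h1 : A ≤ c) (h2 : d ≤ B)
    (h0 : ∀ j, A ≤ j → j < B → f j ≠ 0 → c ≤ j ∧ j < d) :
    ((PySem.List.pyRange A B).map f).sum = ((PySem.List.pyRange c d).map f).sum := by
  have hz : ∀ x ∈ PySem.List.pyRange A B, (fun j => decide (c ≤ j ∧ j < d)) x = false → f x = 0 := by
    intro x hx hq
    rw [PySem.List.mem_pyRange_one] at hx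
    have hnot : ¬(c ≤ x ∧ x < d) := by simpa using hq
    by_contra hne
    exact hnot (h0 x hx.1 hx.2 hne)
  rw [sum_map_filter_of_zero f (fun j => decide (c ≤ j ∧ j < d)) _ hz,
      filter_pyRange_interval, max_eq_right h1, min_eq_right h2]

theorem sum_sum_swap (L1 L2 : List Int) (f : Int → Int → Int) :
    (L1.map (fun i => (L2.map (f i)).sum)).sum
      = (L2.map (fun j => (L1.map (fun i => f i j)).sum)).sum := by
  induction L1 with
  | nil => simp
  | cons x L ih =>
    simp only [List.map_cons, List.sum_cons, ih, PySem.List.sum_map_add_int]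

theorem sum_pyRange_shift (f : Int → Int) (k : Int) :
    ∀ (n : Nat) (a b : Int), (b - a).toNat ≤ n →
    ((PySem.List.pyRange a b).map f).sum
      = ((PySem.List.pyRange (a + k) (b + k)).map (fun j => f (j - k))).sum := by
  intro n
  induction n with
  | zero =>
    intro a b h
    rw [PySem.List.pyRange_one_eq_nil (by omega), PySem.List.pyRange_one_eq_nil (by omega)]
    rfl
  | succ n ih =>
    intro a b h
    by_cases hab : a < b
    · rw [PySem.List.pyRange_one_cons hab, PySem.List.pyRange_one_cons (by omega : a + k < b + k)]
      simp only [List.map_cons, List.sum_cons]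
      rw [show a + k - k = a by ring, ih (a + 1) b (by omega),
        show a + 1 + k = a + k + 1 by ring]
    · rw [PySem.List.pyRange_one_eq_nil (by omega), PySem.List.pyRange_one_eq_nil (by omega)]
      rfl

-- === window count of a line that is the image of an integer range ===
theorem win3_map_pyRange (g : Int → Char) (a b c : Char) :
    ∀ (n : Nat) (lo hi : Int), (hi - lo).toNat ≤ n →
    ((win3 a b c ((PySem.List.pyRange lo hi).map g) : Nat) : Int)
      = ((PySem.List.pyRange lo (hi - 2)).map (fun j =>
          if g j = a ∧ g (j + 1) = b ∧ g (j + 2) = c then (1 : Int) else 0)).sum := by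
  intro n
  induction n with
  | zero =>
    intro lo hi h
    rw [PySem.List.pyRange_one_eq_nil (by omega : hi ≤ lo),
        PySem.List.pyRange_one_eq_nil (by omega : hi - 2 ≤ lo)]
    simp [win3]
  | succ n ih =>
    intro lo hi h
    by_cases h2 : lo + 2 < hi
    · have e1 : PySem.List.pyRange lo hi = lo :: PySem.List.pyRange (lo + 1) hi :=
        PySem.List.pyRange_one_cons (by omega)
      have e2 : PySem.List.pyRange (lo + 1) hi = (lo + 1) :: PySem.List.pyRange (lo + 2) hi := by
        rw [PySem.List.pyRange_one_cons (by omega : lo + 1 < hi), show lo + 1 + 1 = lo + 2 by ring]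
      have e3 : PySem.List.pyRange (lo + 2) hi = (lo + 2) :: PySem.List.pyRange (lo + 3) hi := by
        rw [PySem.List.pyRange_one_cons (by omega : lo + 2 < hi), show lo + 2 + 1 = lo + 3 by ring]
      have hw : win3 a b c ((PySem.List.pyRange lo hi).map g)
          = (if g lo = a ∧ g (lo + 1) = b ∧ g (lo + 2) = c then 1 else 0)
            + win3 a b c ((PySem.List.pyRange (lo + 1) hi).map g) := by
        rw [e1, e2, e3, List.map_cons, List.map_cons, List.map_cons, win3]
      rw [hw]
      rw [PySem.List.pyRange_one_cons (by omega : lo < hi - 2), List.map_cons, List.sum_cons]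
      push_cast
      rw [ih (lo + 1) hi (by omega)]
    · rw [PySem.List.pyRange_one_eq_nil (by omega : hi - 2 ≤ lo)]
      have hl : ((PySem.List.pyRange lo hi).map g).length ≤ 2 := by
        rw [List.length_map, PySem.List.length_pyRange_one]
        omega
      rw [win3_short a b c _ hl]
      simp

-- === in-range indexing produces singleton one-char strings ===
theorem pyGet?_eq_some_getD {α : Type} (xs : List α) (i : Int) (d : α)
    (h0 : 0 ≤ i) (h1 : i < (xs.length : Int)) :
    PySem.List.pyGet? xs i = some (PySem.List.pyGetD xs i d) := by
  have hi : i = ((i.toNat : Nat) : Int) := by omega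
  rw [hi, PySem.List.pyGet?_natCast, PySem.List.pyGetD, PySem.List.pyGet?_natCast]
  have h : i.toNat < xs.length := by omega
  simp [List.getElem?_eq_getElem h]

theorem pyCh_singleton (cs : List Char) (j : Int) (h0 : 0 ≤ j) (h1 : j < (cs.length : Int)) :
    pyCh cs j = [PySem.List.pyGetD cs j '?'] := by
  unfold pyCh
  rw [pyGet?_eq_some_getD cs j '?' h0 h1]

theorem pyChAt_singleton (t : List String) (r cidx : Int) (h0 : 0 ≤ r) (h1 : r < (t.length : Int))
    (h2 : 0 ≤ cidx) (h3 : cidx < ((PySem.List.pyGetD t r "").toList.length : Int)) :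
    pyChAt t r cidx = [gAt t r cidx] := by
  unfold pyChAt
  rw [pyGet?_eq_some_getD t r "" h0 h1]
  exact pyCh_singleton _ cidx h2 h3

theorem rowlen_ge (t : List String) (C : Nat) (hC : ∀ r ∈ t, C ≤ r.toList.length)
    (r : Int) (h0 : 0 ≤ r) (h1 : r < (t.length : Int)) :
    (C : Int) ≤ ((PySem.List.pyGetD t r "").toList.length : Int) := by
  have hm : PySem.List.pyGetD t r "" ∈ t := by
    rw [PySem.List.pyGetD_eq_getElem t "" h0 h1]
    exact List.getElem_mem _
  exact_mod_cast hC _ hm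

-- === the four per-part equalities (one 3-char pattern at a time) ===
theorem row_part (row : List Char) (a b c : Char) (hac : a ≠ c) :
    (PySem.Chars.count row [a, b, c] : Int)
      = ((PySem.List.pyRange 0 ((row.length : Int) - 2)).map (fun j =>
          if pyCh row j = [a] ∧ pyCh row (j + 1) = [b] ∧ pyCh row (j + 2) = [c]
          then (1 : Int) else 0)).sum := by
  rw [count_eq_win3 a b c hac]
  have hrow : (PySem.List.pyRange 0 (PySem.List.len row)).map (fun j => PySem.List.pyGetD row j '?') = row :=
    PySem.List.map_pyGetD_pyRange_zero row '?'
  conv_lhs => rw [← hrow]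
  rw [win3_map_pyRange (fun j => PySem.List.pyGetD row j '?') a b c
      (PySem.List.len row - 0).toNat 0 (PySem.List.len row) le_rfl]
  have hl : PySem.List.len row = (row.length : Int) := rfl
  rw [hl]
  congr 1
  apply List.map_congr_left
  intro j hj
  rw [PySem.List.mem_pyRange_one] at hj
  rw [pyCh_singleton row j (by omega) (by omega),
      pyCh_singleton row (j + 1) (by omega) (by omega),
      pyCh_singleton row (j + 2) (by omega) (by omega)]
  simp only [List.cons.injEq, and_true]

theorem line_flatten_map (t : List String) (i : Int) (f : Int → Char)
    (hf : ∀ r, 0 ≤ r → r < (t.length : Int) → pyCh (PySem.List.pyGetD t r "").toList i = [f r]) :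
    (t.map (fun row => pyCh row.toList i)).flatten
      = (PySem.List.pyRange 0 (PySem.List.len t)).map f := by
  conv_lhs => rw [← PySem.List.map_pyGetD_pyRange_zero t ""]
  rw [List.map_map]
  have hcg : ∀ r ∈ PySem.List.pyRange 0 (PySem.List.len t),
      ((fun row => pyCh row.toList i) ∘ (fun j => PySem.List.pyGetD t j "")) r = [f r] := by
    intro r hr
    rw [PySem.List.mem_pyRange_one] at hr
    exact hf r hr.1 hr.2
  rw [List.map_congr_left hcg, ← List.flatMap_def]
  exact Eq.symm List.map_eq_flatMap

theorem col_part (t : List String) (C : Nat) (a b c : Char) (hac : a ≠ c)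
    (hC : ∀ r ∈ t, C ≤ r.toList.length) (i : Int) (hi0 : 0 ≤ i) (hi1 : i < (C : Int)) :
    (PySem.Chars.count ((t.map (fun row => pyCh row.toList i)).flatten) [a, b, c] : Int)
      = ((PySem.List.pyRange 0 ((t.length : Int) - 2)).map (fun r =>
          if pyChAt t r i = [a] ∧ pyChAt t (r + 1) i = [b] ∧ pyChAt t (r + 2) i = [c]
          then (1 : Int) else 0)).sum := by
  have hone : ∀ r : Int, 0 ≤ r → r < (t.length : Int) →
      pyCh (PySem.List.pyGetD t r "").toList i = [gAt t r i] := by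
    intro r h0 h1
    exact pyCh_singleton _ i hi0 (lt_of_lt_of_le hi1 (rowlen_ge t C hC r h0 h1))
  rw [line_flatten_map t i (fun r => gAt t r i) hone, count_eq_win3 a b c hac,
      win3_map_pyRange (fun r => gAt t r i) a b c
        (PySem.List.len t - 0).toNat 0 (PySem.List.len t) le_rfl]
  have hl : PySem.List.len t = (t.length : Int) := rfl
  rw [hl]
  congr 1
  apply List.map_congr_left
  intro r hr
  rw [PySem.List.mem_pyRange_one] at hr
  have hlen : ∀ rr : Int, 0 ≤ rr → rr < (t.length : Int) →
      i < ((PySem.List.pyGetD t rr "").toList.length : Int) :=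
    fun rr h0 h1 => lt_of_lt_of_le hi1 (rowlen_ge t C hC rr h0 h1)
  rw [pyChAt_singleton t r i (by omega) (by omega) hi0 (hlen r (by omega) (by omega)),
      pyChAt_singleton t (r + 1) i (by omega) (by omega) hi0 (hlen (r + 1) (by omega) (by omega)),
      pyChAt_singleton t (r + 2) i (by omega) (by omega) hi0 (hlen (r + 2) (by omega) (by omega))]
  simp only [List.cons.injEq, and_true]

theorem flatten_map_singleton {α : Type} (L : List Int) (g : Int → α) :
    (L.map (fun j => [g j])).flatten = L.map g := by
  rw [← List.flatMap_def]
  exact Eq.symm List.map_eq_flatMap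

-- 0/1 contribution of the anti-diagonal window whose top cell is (j, i-j)
def adQ (t : List String) (C : Nat) (a b c : Char) (i j : Int) : Int :=
  if (2 ≤ i - j ∧ i - j < (C : Int) ∧ 0 ≤ j ∧ j + 2 < (t.length : Int)) ∧
     (gAt t j (i - j) = a ∧ gAt t (j + 1) (i - j - 1) = b ∧ gAt t (j + 2) (i - j - 2) = c)
  then (1 : Int) else 0

theorem adQ_bnds {t : List String} {C : Nat} {a b c : Char} {i j : Int}
    (h : adQ t C a b c i j ≠ 0) :
    2 ≤ i - j ∧ i - j < (C : Int) ∧ 0 ≤ j ∧ j + 2 < (t.length : Int) := by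
  unfold adQ at h
  split_ifs at h with hc
  · exact hc.1
  · exact absurd rfl h

-- 0/1 contribution of the main-diagonal window whose top cell is (j, i+j)
def mdQ (t : List String) (C : Nat) (a b c : Char) (i j : Int) : Int :=
  if (0 ≤ i + j ∧ i + j + 2 < (C : Int) ∧ 0 ≤ j ∧ j + 2 < (t.length : Int)) ∧
     (gAt t j (i + j) = a ∧ gAt t (j + 1) (i + j + 1) = b ∧ gAt t (j + 2) (i + j + 2) = c)
  then (1 : Int) else 0

theorem mdQ_bnds {t : List String} {C : Nat} {a b c : Char} {i j : Int}
    (h : mdQ t C a b c i j ≠ 0) :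
    0 ≤ i + j ∧ i + j + 2 < (C : Int) ∧ 0 ≤ j ∧ j + 2 < (t.length : Int) := by
  unfold mdQ at h
  split_ifs at h with hc
  · exact hc.1
  · exact absurd rfl h

theorem ad_part (t : List String) (C : Nat) (a b c : Char) (hac : a ≠ c)
    (hC : ∀ r ∈ t, C ≤ r.toList.length) :
    ((PySem.List.pyRange 0 ((t.length : Int) + (C : Int) - 1)).map (fun i =>
      (PySem.Chars.count (((PySem.List.pyRange (max 0 (i - (C : Int) + 1)) (min (t.length : Int) (i + 1))).map
          (fun j => pyChAt t j (i - j))).flatten) [a, b, c] : Int))).sum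
    = ((PySem.List.pyRange 0 ((t.length : Int) - 2)).map (fun r =>
        ((PySem.List.pyRange 2 (C : Int)).map (fun j =>
          if pyChAt t r j = [a] ∧ pyChAt t (r + 1) (j - 1) = [b] ∧ pyChAt t (r + 2) (j - 2) = [c]
          then (1 : Int) else 0)).sum)).sum := by
  have hline : ∀ i ∈ PySem.List.pyRange 0 ((t.length : Int) + (C : Int) - 1),
      (PySem.Chars.count (((PySem.List.pyRange (max 0 (i - (C : Int) + 1)) (min (t.length : Int) (i + 1))).map
          (fun j => pyChAt t j (i - j))).flatten) [a, b, c] : Int)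
        = ((PySem.List.pyRange 0 (t.length : Int)).map (fun j => adQ t C a b c i j)).sum := by
    intro i hi
    rw [PySem.List.mem_pyRange_one] at hi
    have hsing : ∀ j ∈ PySem.List.pyRange (max 0 (i - (C : Int) + 1)) (min (t.length : Int) (i + 1)),
        pyChAt t j (i - j) = [gAt t j (i - j)] := by
      intro j hj
      rw [PySem.List.mem_pyRange_one] at hj
      exact pyChAt_singleton t j (i - j) (by omega) (by omega) (by omega)
        (lt_of_lt_of_le (by omega) (rowlen_ge t C hC j (by omega) (by omega)))
    rw [List.map_congr_left hsing, flatten_map_singleton, count_eq_win3 a b c hac,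
        win3_map_pyRange (fun j => gAt t j (i - j)) a b c
          ((min (t.length : Int) (i + 1)) - (max 0 (i - (C : Int) + 1))).toNat _ _ le_rfl]
    have hmid : ∀ j ∈ PySem.List.pyRange (max 0 (i - (C : Int) + 1)) (min (t.length : Int) (i + 1) - 2),
        (if gAt t j (i - j) = a ∧ gAt t (j + 1) (i - (j + 1)) = b ∧ gAt t (j + 2) (i - (j + 2)) = c
         then (1 : Int) else 0) = adQ t C a b c i j := by
      intro j hj
      rw [PySem.List.mem_pyRange_one] at hj
      unfold adQ
      rw [show i - (j + 1) = i - j - 1 by ring, show i - (j + 2) = i - j - 2 by ring]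
      exact if_congr (Iff.symm (and_iff_right (by omega))) rfl rfl
    rw [List.map_congr_left hmid]
    exact (sum_pyRange_congr (fun j => adQ t C a b c i j) (by omega) (by omega)
      (fun j hA hB hne => by have := adQ_bnds hne; omega)).symm
  rw [List.map_congr_left hline, sum_sum_swap]
  have houter : ((PySem.List.pyRange 0 (t.length : Int)).map (fun j =>
        ((PySem.List.pyRange 0 ((t.length : Int) + (C : Int) - 1)).map (fun i => adQ t C a b c i j)).sum)).sum
      = ((PySem.List.pyRange 0 ((t.length : Int) - 2)).map (fun j =>
        ((PySem.List.pyRange 0 ((t.length : Int) + (C : Int) - 1)).map (fun i => adQ t C a b c i j)).sum)).sum := by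
    apply sum_pyRange_congr _ (le_refl 0) (by omega)
    intro j hA hB hne
    by_contra hcon
    apply hne
    have hz : ∀ i ∈ PySem.List.pyRange 0 ((t.length : Int) + (C : Int) - 1), adQ t C a b c i j = 0 := by
      intro i _
      unfold adQ
      rw [if_neg]
      rintro ⟨hb, -⟩
      omega
    rw [List.map_congr_left hz]
    simp
  rw [houter]
  congr 1
  apply List.map_congr_left
  intro j hj
  rw [PySem.List.mem_pyRange_one] at hj
  have hshift : ((PySem.List.pyRange 0 ((t.length : Int) + (C : Int) - 1)).map (fun i => adQ t C a b c i j)).sum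
      = ((PySem.List.pyRange (0 + -j) ((t.length : Int) + (C : Int) - 1 + -j)).map
          (fun v => adQ t C a b c (v - -j) j)).sum :=
    sum_pyRange_shift (fun i => adQ t C a b c i j) (-j)
      ((t.length : Int) + (C : Int) - 1 - 0).toNat 0 ((t.length : Int) + (C : Int) - 1) le_rfl
  rw [hshift]
  have hnarrow : ((PySem.List.pyRange (0 + -j) ((t.length : Int) + (C : Int) - 1 + -j)).map
        (fun v => adQ t C a b c (v - -j) j)).sum
      = ((PySem.List.pyRange 2 (C : Int)).map (fun v => adQ t C a b c (v - -j) j)).sum := by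
    apply sum_pyRange_congr _ (by omega) (by omega)
    intro v hA hB hne
    have := adQ_bnds hne
    omega
  rw [hnarrow]
  congr 1
  apply List.map_congr_left
  intro v hv
  rw [PySem.List.mem_pyRange_one] at hv
  unfold adQ
  rw [show v - -j - j = v by ring]
  have hrl : ∀ rr : Int, 0 ≤ rr → rr < (t.length : Int) →
      (C : Int) ≤ ((PySem.List.pyGetD t rr "").toList.length : Int) :=
    fun rr h0 h1 => rowlen_ge t C hC rr h0 h1
  rw [pyChAt_singleton t j v (by omega) (by omega) (by omega)
        (lt_of_lt_of_le (by omega) (hrl j (by omega) (by omega))),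
      pyChAt_singleton t (j + 1) (v - 1) (by omega) (by omega) (by omega)
        (lt_of_lt_of_le (by omega) (hrl (j + 1) (by omega) (by omega))),
      pyChAt_singleton t (j + 2) (v - 2) (by omega) (by omega) (by omega)
        (lt_of_lt_of_le (by omega) (hrl (j + 2) (by omega) (by omega)))]
  simp only [List.cons.injEq, and_true]
  exact if_congr (and_iff_right (by omega)) rfl rfl

theorem md_part (t : List String) (C : Nat) (a b c : Char) (hac : a ≠ c)
    (hC : ∀ r ∈ t, C ≤ r.toList.length) :
    ((PySem.List.pyRange (1 - (t.length : Int)) (C : Int)).map (fun i =>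
      (PySem.Chars.count (((PySem.List.pyRange (max 0 (-i)) (min (t.length : Int) ((C : Int) - i))).map
          (fun j => pyChAt t j (i + j))).flatten) [a, b, c] : Int))).sum
    = ((PySem.List.pyRange 0 ((t.length : Int) - 2)).map (fun r =>
        ((PySem.List.pyRange 0 ((C : Int) - 2)).map (fun j =>
          if pyChAt t r j = [a] ∧ pyChAt t (r + 1) (j + 1) = [b] ∧ pyChAt t (r + 2) (j + 2) = [c]
          then (1 : Int) else 0)).sum)).sum := by
  have hline : ∀ i ∈ PySem.List.pyRange (1 - (t.length : Int)) (C : Int),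
      (PySem.Chars.count (((PySem.List.pyRange (max 0 (-i)) (min (t.length : Int) ((C : Int) - i))).map
          (fun j => pyChAt t j (i + j))).flatten) [a, b, c] : Int)
        = ((PySem.List.pyRange 0 (t.length : Int)).map (fun j => mdQ t C a b c i j)).sum := by
    intro i hi
    rw [PySem.List.mem_pyRange_one] at hi
    have hsing : ∀ j ∈ PySem.List.pyRange (max 0 (-i)) (min (t.length : Int) ((C : Int) - i)),
        pyChAt t j (i + j) = [gAt t j (i + j)] := by
      intro j hj
      rw [PySem.List.mem_pyRange_one] at hj
      exact pyChAt_singleton t j (i + j) (by omega) (by omega) (by omega)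
        (lt_of_lt_of_le (by omega) (rowlen_ge t C hC j (by omega) (by omega)))
    rw [List.map_congr_left hsing, flatten_map_singleton, count_eq_win3 a b c hac,
        win3_map_pyRange (fun j => gAt t j (i + j)) a b c
          ((min (t.length : Int) ((C : Int) - i)) - (max 0 (-i))).toNat _ _ le_rfl]
    have hmid : ∀ j ∈ PySem.List.pyRange (max 0 (-i)) (min (t.length : Int) ((C : Int) - i) - 2),
        (if gAt t j (i + j) = a ∧ gAt t (j + 1) (i + (j + 1)) = b ∧ gAt t (j + 2) (i + (j + 2)) = c
         then (1 : Int) else 0) = mdQ t C a b c i j := by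
      intro j hj
      rw [PySem.List.mem_pyRange_one] at hj
      unfold mdQ
      rw [show i + (j + 1) = i + j + 1 by ring, show i + (j + 2) = i + j + 2 by ring]
      exact if_congr (Iff.symm (and_iff_right (by omega))) rfl rfl
    rw [List.map_congr_left hmid]
    exact (sum_pyRange_congr (fun j => mdQ t C a b c i j) (by omega) (by omega)
      (fun j hA hB hne => by have := mdQ_bnds hne; omega)).symm
  rw [List.map_congr_left hline, sum_sum_swap]
  have houter : ((PySem.List.pyRange 0 (t.length : Int)).map (fun j =>
        ((PySem.List.pyRange (1 - (t.length : Int)) (C : Int)).map (fun i => mdQ t C a b c i j)).sum)).sum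
      = ((PySem.List.pyRange 0 ((t.length : Int) - 2)).map (fun j =>
        ((PySem.List.pyRange (1 - (t.length : Int)) (C : Int)).map (fun i => mdQ t C a b c i j)).sum)).sum := by
    apply sum_pyRange_congr _ (le_refl 0) (by omega)
    intro j hA hB hne
    by_contra hcon
    apply hne
    have hz : ∀ i ∈ PySem.List.pyRange (1 - (t.length : Int)) (C : Int), mdQ t C a b c i j = 0 := by
      intro i _
      unfold mdQ
      rw [if_neg]
      rintro ⟨hb, -⟩
      omega
    rw [List.map_congr_left hz]
    simp
  rw [houter]
  congr 1
  apply List.map_congr_left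
  intro j hj
  rw [PySem.List.mem_pyRange_one] at hj
  have hshift : ((PySem.List.pyRange (1 - (t.length : Int)) (C : Int)).map (fun i => mdQ t C a b c i j)).sum
      = ((PySem.List.pyRange (1 - (t.length : Int) + j) ((C : Int) + j)).map
          (fun v => mdQ t C a b c (v - j) j)).sum :=
    sum_pyRange_shift (fun i => mdQ t C a b c i j) j
      ((C : Int) - (1 - (t.length : Int))).toNat (1 - (t.length : Int)) (C : Int) le_rfl
  rw [hshift]
  have hnarrow : ((PySem.List.pyRange (1 - (t.length : Int) + j) ((C : Int) + j)).map
        (fun v => mdQ t C a b c (v - j) j)).sum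
      = ((PySem.List.pyRange 0 ((C : Int) - 2)).map (fun v => mdQ t C a b c (v - j) j)).sum := by
    apply sum_pyRange_congr _ (by omega) (by omega)
    intro v hA hB hne
    have := mdQ_bnds hne
    omega
  rw [hnarrow]
  congr 1
  apply List.map_congr_left
  intro v hv
  rw [PySem.List.mem_pyRange_one] at hv
  unfold mdQ
  rw [show v - j + j = v by ring]
  have hrl : ∀ rr : Int, 0 ≤ rr → rr < (t.length : Int) →
      (C : Int) ≤ ((PySem.List.pyGetD t rr "").toList.length : Int) :=
    fun rr h0 h1 => rowlen_ge t C hC rr h0 h1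
  rw [pyChAt_singleton t j v (by omega) (by omega) (by omega)
        (lt_of_lt_of_le (by omega) (hrl j (by omega) (by omega))),
      pyChAt_singleton t (j + 1) (v + 1) (by omega) (by omega) (by omega)
        (lt_of_lt_of_le (by omega) (hrl (j + 1) (by omega) (by omega))),
      pyChAt_singleton t (j + 2) (v + 2) (by omega) (by omega) (by omega)
        (lt_of_lt_of_le (by omega) (hrl (j + 2) (by omega) (by omega)))]
  simp only [List.cons.injEq, and_true]
  exact if_congr (and_iff_right (by omega)) rfl rfl

-- ===== VERDICT (by name: the statement is the Claim_ definition above) =====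
theorem count_go_stuck (p : List Char) : ∀ (fuel : Nat) (s : List Char) (acc : Nat),
    s.length < p.length → PySem.Chars.count.go p fuel s acc = acc := by
  intro fuel
  induction fuel with
  | zero => intro s acc _; rw [PySem.Chars.count.go]
  | succ n ih =>
    intro s acc h
    cases s with
    | nil =>
      rw [PySem.Chars.count.go]
      simp
    | cons x tl =>
      rw [PySem.Chars.count.go]
      have hp : ¬ p.isPrefixOf (x :: tl) = true := by
        intro hpre
        have := (List.isPrefixOf_iff_prefix.mp hpre).length_le
        simp at this h
        omega
      rw [if_neg hp]
      exact ih tl acc (by simp at h ⊢; omega)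

theorem count_short (s p : List Char) (hp : p ≠ []) (h : s.length < p.length) :
    PySem.Chars.count s p = 0 := by
  rw [PySem.Chars.count]
  simp only [List.isEmpty_iff, hp, if_false]
  exact count_go_stuck p s.length s 0 h

theorem pyCh_len_le (cs : List Char) (i : Int) : (pyCh cs i).length ≤ 1 := by
  unfold pyCh
  cases PySem.List.pyGet? cs i <;> simp

theorem pyChAt_len_le (t : List String) (j k : Int) : (pyChAt t j k).length ≤ 1 := by
  unfold pyChAt
  cases PySem.List.pyGet? t j
  · simp
  · exact pyCh_len_le _ _

theorem flatten_len_le {α : Type} (L : List α) (f : α → List Char)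
    (hf : ∀ x, (f x).length ≤ 1) : ((L.map f).flatten).length ≤ L.length := by
  induction L with
  | nil => simp
  | cons x L ih =>
    simp only [List.map_cons, List.flatten_cons, List.length_append, List.length_cons]
    have := hf x
    omega

theorem count_spec : Claim_equal_count := by
  intro t m o _ hpre
  unfold Spec_count count count_alt
  by_cases hg : (m == o || m == "M" || o == "O") = true
  · rw [if_pos hg, if_pos hg]
  · rw [if_neg hg, if_neg hg]
    dsimp only
    have hg' : ¬(m = o ∨ m = "M" ∨ o = "O") := by
      intro h
      apply hg
      rcases h with h | h | h <;> simp [h]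
    rcases hpre with hpre | ⟨hne, hlen0, hpat⟩
    · exact absurd hpre hg'
    have hCle : ∀ r ∈ t, ((PySem.List.pyGet? t 0).getD "").toList.length ≤ r.toList.length := by
      have h0 : (PySem.List.pyGet? t 0).getD "" = t.headD "" := by
        cases t with
        | nil => exact absurd rfl hne
        | cons x xs =>
          rw [pyGet?_eq_some_getD (x :: xs) 0 "" (by omega) (by simp)]
          rw [PySem.List.pyGetD_eq_getElem (x :: xs) "" (by omega) (by simp)]
          simp
      intro r hr
      rw [h0]
      exact hlen0 r hr
    by_cases hsingle : m.toList.length = 1 ∧ o.toList.length = 1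
    · obtain ⟨mc, hm⟩ := List.length_eq_one_iff.mp hsingle.1
      obtain ⟨oc, ho⟩ := List.length_eq_one_iff.mp hsingle.2
      have hmo : mc ≠ oc := by
        intro h
        apply hg'
        left
        apply String.toList_inj.mp
        rw [hm, ho, h]
      have hom : oc ≠ mc := fun h => hmo h.symm
      simp only [hm, ho, List.cons_append, List.nil_append]
      rw [foldl_add2 t _ _,
          foldl_add2 (PySem.List.pyRange 0 (((PySem.List.pyGet? t 0).getD "").toList.length : Int)) _ _,
          foldl_add2 (PySem.List.pyRange 0 ((t.length : Int) + (((PySem.List.pyGet? t 0).getD "").toList.length : Int) - 1)) _ _,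
          foldl_add2 (PySem.List.pyRange (1 - (t.length : Int)) (((PySem.List.pyGet? t 0).getD "").toList.length : Int)) _ _]
      have hcolA : ∀ i : Int, t.foldl (fun s j => s ++ pyCh j.toList i) ([] : List Char)
          = (t.map (fun row => pyCh row.toList i)).flatten := by
        intro i
        rw [PySem.List.foldl_append_eq_flatMap (fun j => pyCh j.toList i) t, List.nil_append,
          List.flatMap_def]
      have hd1 : ∀ i : Int, (PySem.List.pyRange 0 (t.length : Int)).foldl
          (fun s j => if i ≥ j ∧ i - j < (((PySem.List.pyGet? t 0).getD "").toList.length : Int) then s ++ pyChAt t j (i - j) else s) ([] : List Char)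
          = ((PySem.List.pyRange (max 0 (i - (((PySem.List.pyGet? t 0).getD "").toList.length : Int) + 1)) (min (t.length : Int) (i + 1))).map
              (fun j => pyChAt t j (i - j))).flatten := by
        intro i
        exact diag_line_eq t (t.length : Int) (i - (((PySem.List.pyGet? t 0).getD "").toList.length : Int) + 1) (i + 1) (fun j => i - j)
          (fun j => i ≥ j ∧ i - j < (((PySem.List.pyGet? t 0).getD "").toList.length : Int)) (fun j => by omega)
      have hd2 : ∀ i : Int, (PySem.List.pyRange 0 (t.length : Int)).foldl
          (fun s j => if 0 ≤ i + j ∧ i + j < (((PySem.List.pyGet? t 0).getD "").toList.length : Int) then s ++ pyChAt t j (i + j) else s) ([] : List Char)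
          = ((PySem.List.pyRange (max 0 (-i)) (min (t.length : Int) ((((PySem.List.pyGet? t 0).getD "").toList.length : Int) - i))).map
              (fun j => pyChAt t j (i + j))).flatten := by
        intro i
        exact diag_line_eq t (t.length : Int) (-i) ((((PySem.List.pyGet? t 0).getD "").toList.length : Int) - i) (fun j => i + j)
          (fun j => 0 ≤ i + j ∧ i + j < (((PySem.List.pyGet? t 0).getD "").toList.length : Int)) (fun j => by omega)
      simp only [hcolA, hd1, hd2]
      have hBrows : ∀ init : Int, (PySem.List.pyRange 0 (t.length : Int)).foldl
          (fun total r => (PySem.List.pyRange 0 (((PySem.List.pyGetD t r "").toList.length : Int) - 2)).foldl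
            (fun total j => (total + (if pyCh (PySem.List.pyGetD t r "").toList j = [mc] ∧ pyCh (PySem.List.pyGetD t r "").toList (j + 1) = [oc] ∧ pyCh (PySem.List.pyGetD t r "").toList (j + 2) = [oc] then (1 : Int) else 0)) + (if pyCh (PySem.List.pyGetD t r "").toList j = [oc] ∧ pyCh (PySem.List.pyGetD t r "").toList (j + 1) = [oc] ∧ pyCh (PySem.List.pyGetD t r "").toList (j + 2) = [mc] then (1 : Int) else 0))
            total) init
          = init + ((PySem.List.pyRange 0 (t.length : Int)).map (fun r => ((PySem.List.pyRange 0 (((PySem.List.pyGetD t r "").toList.length : Int) - 2)).map (fun j => (if pyCh (PySem.List.pyGetD t r "").toList j = [mc] ∧ pyCh (PySem.List.pyGetD t r "").toList (j + 1) = [oc] ∧ pyCh (PySem.List.pyGetD t r "").toList (j + 2) = [oc] then (1 : Int) else 0) + (if pyCh (PySem.List.pyGetD t r "").toList j = [oc] ∧ pyCh (PySem.List.pyGetD t r "").toList (j + 1) = [oc] ∧ pyCh (PySem.List.pyGetD t r "").toList (j + 2) = [mc] then (1 : Int) else 0))).sum)).sum := by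
        intro init
        rw [PySem.List.foldl_congr_mem _ _ (fun (total : Int) (r : Int) => total + ((PySem.List.pyRange 0 (((PySem.List.pyGetD t r "").toList.length : Int) - 2)).map (fun j => (if pyCh (PySem.List.pyGetD t r "").toList j = [mc] ∧ pyCh (PySem.List.pyGetD t r "").toList (j + 1) = [oc] ∧ pyCh (PySem.List.pyGetD t r "").toList (j + 2) = [oc] then (1 : Int) else 0) + (if pyCh (PySem.List.pyGetD t r "").toList j = [oc] ∧ pyCh (PySem.List.pyGetD t r "").toList (j + 1) = [oc] ∧ pyCh (PySem.List.pyGetD t r "").toList (j + 2) = [mc] then (1 : Int) else 0))).sum) init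
          (fun acc r _ => foldl_add2 _ _ _ acc), PySem.List.foldl_add]
      have hBcols : ∀ init : Int, (PySem.List.pyRange 0 (((PySem.List.pyGet? t 0).getD "").toList.length : Int)).foldl
          (fun total j => (PySem.List.pyRange 0 ((t.length : Int) - 2)).foldl
            (fun total r => (total + (if pyChAt t r j = [mc] ∧ pyChAt t (r + 1) j = [oc] ∧ pyChAt t (r + 2) j = [oc] then (1 : Int) else 0)) + (if pyChAt t r j = [oc] ∧ pyChAt t (r + 1) j = [oc] ∧ pyChAt t (r + 2) j = [mc] then (1 : Int) else 0)) total) init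
          = init + ((PySem.List.pyRange 0 (((PySem.List.pyGet? t 0).getD "").toList.length : Int)).map (fun j => ((PySem.List.pyRange 0 ((t.length : Int) - 2)).map (fun r => (if pyChAt t r j = [mc] ∧ pyChAt t (r + 1) j = [oc] ∧ pyChAt t (r + 2) j = [oc] then (1 : Int) else 0) + (if pyChAt t r j = [oc] ∧ pyChAt t (r + 1) j = [oc] ∧ pyChAt t (r + 2) j = [mc] then (1 : Int) else 0))).sum)).sum := by
        intro init
        rw [PySem.List.foldl_congr_mem _ _ (fun (total : Int) (j : Int) => total + ((PySem.List.pyRange 0 ((t.length : Int) - 2)).map (fun r => (if pyChAt t r j = [mc] ∧ pyChAt t (r + 1) j = [oc] ∧ pyChAt t (r + 2) j = [oc] then (1 : Int) else 0) + (if pyChAt t r j = [oc] ∧ pyChAt t (r + 1) j = [oc] ∧ pyChAt t (r + 2) j = [mc] then (1 : Int) else 0))).sum) init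
          (fun acc j _ => foldl_add2 _ _ _ acc), PySem.List.foldl_add]
      have hBdiag : ∀ init : Int, (PySem.List.pyRange 0 ((t.length : Int) - 2)).foldl
          (fun total r => (PySem.List.pyRange 0 ((((PySem.List.pyGet? t 0).getD "").toList.length : Int) - 2)).foldl
            (fun total j => (total + (if pyChAt t r j = [mc] ∧ pyChAt t (r + 1) (j + 1) = [oc] ∧ pyChAt t (r + 2) (j + 2) = [oc] then (1 : Int) else 0)) + (if pyChAt t r j = [oc] ∧ pyChAt t (r + 1) (j + 1) = [oc] ∧ pyChAt t (r + 2) (j + 2) = [mc] then (1 : Int) else 0))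
            ((PySem.List.pyRange 2 (((PySem.List.pyGet? t 0).getD "").toList.length : Int)).foldl
              (fun total j => (total + (if pyChAt t r j = [mc] ∧ pyChAt t (r + 1) (j - 1) = [oc] ∧ pyChAt t (r + 2) (j - 2) = [oc] then (1 : Int) else 0)) + (if pyChAt t r j = [oc] ∧ pyChAt t (r + 1) (j - 1) = [oc] ∧ pyChAt t (r + 2) (j - 2) = [mc] then (1 : Int) else 0)) total)) init
          = init + ((PySem.List.pyRange 0 ((t.length : Int) - 2)).map (fun r => ((PySem.List.pyRange 2 (((PySem.List.pyGet? t 0).getD "").toList.length : Int)).map (fun j => (if pyChAt t r j = [mc] ∧ pyChAt t (r + 1) (j - 1) = [oc] ∧ pyChAt t (r + 2) (j - 2) = [oc] then (1 : Int) else 0) + (if pyChAt t r j = [oc] ∧ pyChAt t (r + 1) (j - 1) = [oc] ∧ pyChAt t (r + 2) (j - 2) = [mc] then (1 : Int) else 0))).sum + ((PySem.List.pyRange 0 ((((PySem.List.pyGet? t 0).getD "").toList.length : Int) - 2)).map (fun j => (if pyChAt t r j = [mc] ∧ pyChAt t (r + 1) (j + 1) = [oc] ∧ pyChAt t (r + 2)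 (j + 2) = [oc] then (1 : Int) else 0) + (if pyChAt t r j = [oc] ∧ pyChAt t (r + 1) (j + 1) = [oc] ∧ pyChAt t (r + 2) (j + 2) = [mc] then (1 : Int) else 0))).sum)).sum := by
        intro init
        rw [PySem.List.foldl_congr_mem _ _ (fun (total : Int) (r : Int) => total + (((PySem.List.pyRange 2 (((PySem.List.pyGet? t 0).getD "").toList.length : Int)).map (fun j => (if pyChAt t r j = [mc] ∧ pyChAt t (r + 1) (j - 1) = [oc] ∧ pyChAt t (r + 2) (j - 2) = [oc] then (1 : Int) else 0) + (if pyChAt t r j = [oc] ∧ pyChAt t (r + 1) (j - 1) = [oc] ∧ pyChAt t (r + 2) (j - 2) = [mc] then (1 : Int) else 0))).sum + ((PySem.List.pyRange 0 ((((PySem.List.pyGet? t 0).getD "").toList.length : Int) - 2)).map (fun j => (if pyChAt t r j = [mc] ∧ pyChAt t (r + 1) (j + 1) = [oc] ∧ pyChAt t (r + 2) (j + 2) = [oc] then (1 : Int) else 0) + (if pyChAt t r j = [oc] ∧ pyChAt t (r + 1) (j + 1) = [oc] ∧ pyChAt t (r + 2) (j + 2) = [mc] then (1 : Int) else 0))).sum))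 init
          (fun acc r _ => by rw [foldl_add2, foldl_add2]; ring), PySem.List.foldl_add]
      rw [hBrows, hBcols, hBdiag]
      have hRowsEq : (t.map (fun i => (PySem.Chars.count i.toList [mc, oc, oc] : Int)
            + (PySem.Chars.count i.toList [oc, oc, mc] : Int))).sum
          = ((PySem.List.pyRange 0 (t.length : Int)).map (fun r => ((PySem.List.pyRange 0 (((PySem.List.pyGetD t r "").toList.length : Int) - 2)).map (fun j => (if pyCh (PySem.List.pyGetD t r "").toList j = [mc] ∧ pyCh (PySem.List.pyGetD t r "").toList (j + 1) = [oc] ∧ pyCh (PySem.List.pyGetD t r "").toList (j + 2) = [oc] then (1 : Int) else 0) + (if pyCh (PySem.List.pyGetD t r "").toList j = [oc] ∧ pyCh (PySem.List.pyGetD t r "").toList (j + 1) = [oc] ∧ pyCh (PySem.List.pyGetD t r "").toList (j + 2) = [mc] then (1 : Int) else 0))).sum)).sum := by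
        have hsm : (PySem.List.pyRange 0 (t.length : Int)).map (fun j => PySem.List.pyGetD t j "") = t :=
          PySem.List.map_pyGetD_pyRange_zero t ""
        conv_lhs => rw [← hsm, List.map_map]
        congr 1
        apply List.map_congr_left
        intro r _
        simp only [Function.comp]
        rw [row_part _ mc oc oc hmo, row_part _ oc oc mc hom, ← PySem.List.sum_map_add_int]
      have hColsEq : ((PySem.List.pyRange 0 (((PySem.List.pyGet? t 0).getD "").toList.length : Int)).map (fun i =>
            (PySem.Chars.count ((t.map (fun row => pyCh row.toList i)).flatten) [mc, oc, oc] : Int)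
            + (PySem.Chars.count ((t.map (fun row => pyCh row.toList i)).flatten) [oc, oc, mc] : Int))).sum
          = ((PySem.List.pyRange 0 (((PySem.List.pyGet? t 0).getD "").toList.length : Int)).map (fun j => ((PySem.List.pyRange 0 ((t.length : Int) - 2)).map (fun r => (if pyChAt t r j = [mc] ∧ pyChAt t (r + 1) j = [oc] ∧ pyChAt t (r + 2) j = [oc] then (1 : Int) else 0) + (if pyChAt t r j = [oc] ∧ pyChAt t (r + 1) j = [oc] ∧ pyChAt t (r + 2) j = [mc] then (1 : Int) else 0))).sum)).sum := by
        congr 1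
        apply List.map_congr_left
        intro i hi
        rw [PySem.List.mem_pyRange_one] at hi
        rw [col_part t ((PySem.List.pyGet? t 0).getD "").toList.length mc oc oc hmo hCle i hi.1 hi.2,
            col_part t ((PySem.List.pyGet? t 0).getD "").toList.length oc oc mc hom hCle i hi.1 hi.2, ← PySem.List.sum_map_add_int]
      have hADEq : ((PySem.List.pyRange 0 ((t.length : Int) + (((PySem.List.pyGet? t 0).getD "").toList.length : Int) - 1)).map (fun i =>
            (PySem.Chars.count (((PySem.List.pyRange (max 0 (i - (((PySem.List.pyGet? t 0).getD "").toList.length : Int) + 1)) (min (t.length : Int) (i + 1))).map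
                (fun j => pyChAt t j (i - j))).flatten) [mc, oc, oc] : Int)
            + (PySem.Chars.count (((PySem.List.pyRange (max 0 (i - (((PySem.List.pyGet? t 0).getD "").toList.length : Int) + 1)) (min (t.length : Int) (i + 1))).map
                (fun j => pyChAt t j (i - j))).flatten) [oc, oc, mc] : Int))).sum
          = ((PySem.List.pyRange 0 ((t.length : Int) - 2)).map (fun r => ((PySem.List.pyRange 2 (((PySem.List.pyGet? t 0).getD "").toList.length : Int)).map (fun j => (if pyChAt t r j = [mc] ∧ pyChAt t (r + 1) (j - 1) = [oc] ∧ pyChAt t (r + 2) (j - 2) = [oc] then (1 : Int) else 0) + (if pyChAt t r j = [oc] ∧ pyChAt t (r + 1) (j - 1) = [oc] ∧ pyChAt t (r + 2) (j - 2) = [mc] then (1 : Int) else 0))).sum)).sum := by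
        rw [PySem.List.sum_map_add_int, ad_part t ((PySem.List.pyGet? t 0).getD "").toList.length mc oc oc hmo hCle,
            ad_part t ((PySem.List.pyGet? t 0).getD "").toList.length oc oc mc hom hCle]
        have hsp : ∀ r ∈ PySem.List.pyRange 0 ((t.length : Int) - 2), ((PySem.List.pyRange 2 (((PySem.List.pyGet? t 0).getD "").toList.length : Int)).map (fun j => (if pyChAt t r j = [mc] ∧ pyChAt t (r + 1) (j - 1) = [oc] ∧ pyChAt t (r + 2) (j - 2) = [oc] then (1 : Int) else 0) + (if pyChAt t r j = [oc] ∧ pyChAt t (r + 1) (j - 1) = [oc] ∧ pyChAt t (r + 2) (j - 2) = [mc] then (1 : Int) else 0))).sum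
            = ((PySem.List.pyRange 2 (((PySem.List.pyGet? t 0).getD "").toList.length : Int)).map (fun j => (if pyChAt t r j = [mc] ∧ pyChAt t (r + 1) (j - 1) = [oc] ∧ pyChAt t (r + 2) (j - 2) = [oc] then (1 : Int) else 0))).sum
              + ((PySem.List.pyRange 2 (((PySem.List.pyGet? t 0).getD "").toList.length : Int)).map (fun j => (if pyChAt t r j = [oc] ∧ pyChAt t (r + 1) (j - 1) = [oc] ∧ pyChAt t (r + 2) (j - 2) = [mc] then (1 : Int) else 0))).sum :=
          fun r _ => PySem.List.sum_map_add_int _ _ _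
        rw [List.map_congr_left hsp, PySem.List.sum_map_add_int]
      have hMDEq : ((PySem.List.pyRange (1 - (t.length : Int)) (((PySem.List.pyGet? t 0).getD "").toList.length : Int)).map (fun i =>
            (PySem.Chars.count (((PySem.List.pyRange (max 0 (-i)) (min (t.length : Int) ((((PySem.List.pyGet? t 0).getD "").toList.length : Int) - i))).map
                (fun j => pyChAt t j (i + j))).flatten) [mc, oc, oc] : Int)
            + (PySem.Chars.count (((PySem.List.pyRange (max 0 (-i)) (min (t.length : Int) ((((PySem.List.pyGet? t 0).getD "").toList.length : Int) - i))).map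
                (fun j => pyChAt t j (i + j))).flatten) [oc, oc, mc] : Int))).sum
          = ((PySem.List.pyRange 0 ((t.length : Int) - 2)).map (fun r => ((PySem.List.pyRange 0 ((((PySem.List.pyGet? t 0).getD "").toList.length : Int) - 2)).map (fun j => (if pyChAt t r j = [mc] ∧ pyChAt t (r + 1) (j + 1) = [oc] ∧ pyChAt t (r + 2) (j + 2) = [oc] then (1 : Int) else 0) + (if pyChAt t r j = [oc] ∧ pyChAt t (r + 1) (j + 1) = [oc] ∧ pyChAt t (r + 2) (j + 2) = [mc] then (1 : Int) else 0))).sum)).sum := by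
        rw [PySem.List.sum_map_add_int, md_part t ((PySem.List.pyGet? t 0).getD "").toList.length mc oc oc hmo hCle,
            md_part t ((PySem.List.pyGet? t 0).getD "").toList.length oc oc mc hom hCle]
        have hsp : ∀ r ∈ PySem.List.pyRange 0 ((t.length : Int) - 2), ((PySem.List.pyRange 0 ((((PySem.List.pyGet? t 0).getD "").toList.length : Int) - 2)).map (fun j => (if pyChAt t r j = [mc] ∧ pyChAt t (r + 1) (j + 1) = [oc] ∧ pyChAt t (r + 2) (j + 2) = [oc] then (1 : Int) else 0) + (if pyChAt t r j = [oc] ∧ pyChAt t (r + 1) (j + 1) = [oc] ∧ pyChAt t (r + 2) (j + 2) = [mc] then (1 : Int) else 0))).sum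
            = ((PySem.List.pyRange 0 ((((PySem.List.pyGet? t 0).getD "").toList.length : Int) - 2)).map (fun j => (if pyChAt t r j = [mc] ∧ pyChAt t (r + 1) (j + 1) = [oc] ∧ pyChAt t (r + 2) (j + 2) = [oc] then (1 : Int) else 0))).sum
              + ((PySem.List.pyRange 0 ((((PySem.List.pyGet? t 0).getD "").toList.length : Int) - 2)).map (fun j => (if pyChAt t r j = [oc] ∧ pyChAt t (r + 1) (j + 1) = [oc] ∧ pyChAt t (r + 2) (j + 2) = [mc] then (1 : Int) else 0))).sum :=
          fun r _ => PySem.List.sum_map_add_int _ _ _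
        rw [List.map_congr_left hsp, PySem.List.sum_map_add_int]
      have hsplit : ((PySem.List.pyRange 0 ((t.length : Int) - 2)).map (fun r => ((PySem.List.pyRange 2 (((PySem.List.pyGet? t 0).getD "").toList.length : Int)).map (fun j => (if pyChAt t r j = [mc] ∧ pyChAt t (r + 1) (j - 1) = [oc] ∧ pyChAt t (r + 2) (j - 2) = [oc] then (1 : Int) else 0) + (if pyChAt t r j = [oc] ∧ pyChAt t (r + 1) (j - 1) = [oc] ∧ pyChAt t (r + 2) (j - 2) = [mc] then (1 : Int) else 0))).sum + ((PySem.List.pyRange 0 ((((PySem.List.pyGet? t 0).getD "").toList.length : Int) - 2)).map (fun j => (if pyChAt t r j = [mc] ∧ pyChAt t (r + 1) (j + 1) = [oc] ∧ pyChAt t (r + 2) (j + 2) = [oc] then (1 : Int) else 0) + (if pyChAt t r j = [oc] ∧ pyChAt t (r + 1) (j + 1) = [oc] ∧ pyChAt t (r + 2) (j + 2) = [mc] then (1 : Int) else 0))).sum)).sum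
          = ((PySem.List.pyRange 0 ((t.length : Int) - 2)).map (fun r => ((PySem.List.pyRange 2 (((PySem.List.pyGet? t 0).getD "").toList.length : Int)).map (fun j => (if pyChAt t r j = [mc] ∧ pyChAt t (r + 1) (j - 1) = [oc] ∧ pyChAt t (r + 2) (j - 2) = [oc] then (1 : Int) else 0) + (if pyChAt t r j = [oc] ∧ pyChAt t (r + 1) (j - 1) = [oc] ∧ pyChAt t (r + 2) (j - 2) = [mc] then (1 : Int) else 0))).sum)).sum
            + ((PySem.List.pyRange 0 ((t.length : Int) - 2)).map (fun r => ((PySem.List.pyRange 0 ((((PySem.List.pyGet? t 0).getD "").toList.length : Int) - 2)).map (fun j => (if pyChAt t r j = [mc] ∧ pyChAt t (r + 1) (j + 1) = [oc] ∧ pyChAt t (r + 2) (j + 2) = [oc] then (1 : Int) else 0) + (if pyChAt t r j = [oc] ∧ pyChAt t (r + 1) (j + 1) = [oc] ∧ pyChAt t (r + 2) (j + 2) = [mc] then (1 : Int) else 0))).sum)).sum :=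
        PySem.List.sum_map_add_int _ _ _
      rw [hRowsEq, hColsEq, hADEq, hMDEq, hsplit]
      omega
    · have hsmall : (∀ r ∈ t, r.toList.length < m.toList.length + 2 * o.toList.length) ∧
          t.length < m.toList.length + 2 * o.toList.length := by
        rcases hpat with h | h
        · exact absurd h hsingle
        · exact h
      have hbad : m.toList.length ≠ 1 ∨ o.toList.length ≠ 1 := by
        by_contra hcon
        push Not at hcon
        exact hsingle ⟨hcon.1, hcon.2⟩
      have hLpos : 0 < m.toList.length + 2 * o.toList.length := by
        by_contra hcon
        push Not at hcon
        have hm0 : m.toList = [] := List.eq_nil_of_length_eq_zero (by omega)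
        have ho0 : o.toList = [] := List.eq_nil_of_length_eq_zero (by omega)
        exact hg' (Or.inl (String.toList_inj.mp (hm0.trans ho0.symm)))
      have hplen1 : (m.toList ++ o.toList ++ o.toList).length = m.toList.length + 2 * o.toList.length := by
        simp only [List.length_append]
        omega
      have hplen2 : (o.toList ++ o.toList ++ m.toList).length = m.toList.length + 2 * o.toList.length := by
        simp only [List.length_append]
        omega
      have hpne1 : (m.toList ++ o.toList ++ o.toList) ≠ [] := List.ne_nil_of_length_pos (by rw [hplen1]; omega)
      have hpne2 : (o.toList ++ o.toList ++ m.toList) ≠ [] := List.ne_nil_of_length_pos (by rw [hplen2]; omega)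
      rw [foldl_add2 t _ _,
          foldl_add2 (PySem.List.pyRange 0 (((PySem.List.pyGet? t 0).getD "").toList.length : Int)) _ _,
          foldl_add2 (PySem.List.pyRange 0 ((t.length : Int) + (((PySem.List.pyGet? t 0).getD "").toList.length : Int) - 1)) _ _,
          foldl_add2 (PySem.List.pyRange (1 - (t.length : Int)) (((PySem.List.pyGet? t 0).getD "").toList.length : Int)) _ _]
      have hcolA : ∀ i : Int, t.foldl (fun s j => s ++ pyCh j.toList i) ([] : List Char)
          = (t.map (fun row => pyCh row.toList i)).flatten := by
        intro i
        rw [PySem.List.foldl_append_eq_flatMap (fun j => pyCh j.toList i) t, List.nil_append,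
          List.flatMap_def]
      have hd1 : ∀ i : Int, (PySem.List.pyRange 0 (t.length : Int)).foldl
          (fun s j => if i ≥ j ∧ i - j < (((PySem.List.pyGet? t 0).getD "").toList.length : Int) then s ++ pyChAt t j (i - j) else s) ([] : List Char)
          = ((PySem.List.pyRange (max 0 (i - (((PySem.List.pyGet? t 0).getD "").toList.length : Int) + 1)) (min (t.length : Int) (i + 1))).map
              (fun j => pyChAt t j (i - j))).flatten := by
        intro i
        exact diag_line_eq t (t.length : Int) (i - (((PySem.List.pyGet? t 0).getD "").toList.length : Int) + 1) (i + 1) (fun j => i - j)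
          (fun j => i ≥ j ∧ i - j < (((PySem.List.pyGet? t 0).getD "").toList.length : Int)) (fun j => by omega)
      have hd2 : ∀ i : Int, (PySem.List.pyRange 0 (t.length : Int)).foldl
          (fun s j => if 0 ≤ i + j ∧ i + j < (((PySem.List.pyGet? t 0).getD "").toList.length : Int) then s ++ pyChAt t j (i + j) else s) ([] : List Char)
          = ((PySem.List.pyRange (max 0 (-i)) (min (t.length : Int) ((((PySem.List.pyGet? t 0).getD "").toList.length : Int) - i))).map
              (fun j => pyChAt t j (i + j))).flatten := by
        intro i
        exact diag_line_eq t (t.length : Int) (-i) ((((PySem.List.pyGet? t 0).getD "").toList.length : Int) - i) (fun j => i + j)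
          (fun j => 0 ≤ i + j ∧ i + j < (((PySem.List.pyGet? t 0).getD "").toList.length : Int)) (fun j => by omega)
      simp only [hcolA, hd1, hd2]
      have hA1 : (t.map (fun i => (PySem.Chars.count i.toList (m.toList ++ o.toList ++ o.toList) : Int)
            + (PySem.Chars.count i.toList (o.toList ++ o.toList ++ m.toList) : Int))).sum = 0 := by
        have hz : ∀ i ∈ t, (PySem.Chars.count i.toList (m.toList ++ o.toList ++ o.toList) : Int)
            + (PySem.Chars.count i.toList (o.toList ++ o.toList ++ m.toList) : Int) = 0 := by
          intro i hi
          rw [count_short i.toList _ hpne1 (by rw [hplen1]; exact hsmall.1 i hi),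
              count_short i.toList _ hpne2 (by rw [hplen2]; exact hsmall.1 i hi)]
          norm_num
        rw [List.map_congr_left hz]
        simp
      have hA2 : ((PySem.List.pyRange 0 (((PySem.List.pyGet? t 0).getD "").toList.length : Int)).map (fun i =>
          (PySem.Chars.count ((t.map (fun row => pyCh row.toList i)).flatten) (m.toList ++ o.toList ++ o.toList) : Int)
          + (PySem.Chars.count ((t.map (fun row => pyCh row.toList i)).flatten) (o.toList ++ o.toList ++ m.toList) : Int))).sum = 0 := by
        have hz : ∀ i ∈ PySem.List.pyRange 0 (((PySem.List.pyGet? t 0).getD "").toList.length : Int),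
            (PySem.Chars.count ((t.map (fun row => pyCh row.toList i)).flatten) (m.toList ++ o.toList ++ o.toList) : Int)
            + (PySem.Chars.count ((t.map (fun row => pyCh row.toList i)).flatten) (o.toList ++ o.toList ++ m.toList) : Int) = 0 := by
          intro i _
          have hfl := flatten_len_le t (fun row => pyCh row.toList i) (fun row => pyCh_len_le row.toList i)
          rw [count_short _ _ hpne1 (by rw [hplen1]; omega),
              count_short _ _ hpne2 (by rw [hplen2]; omega)]
          norm_num
        rw [List.map_congr_left hz]
        simp
      have hA3 : ((PySem.List.pyRange 0 ((t.length : Int) + (((PySem.List.pyGet? t 0).getD "").toList.length : Int) - 1)).map (fun i =>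
          (PySem.Chars.count (((PySem.List.pyRange (max 0 (i - (((PySem.List.pyGet? t 0).getD "").toList.length : Int) + 1)) (min (t.length : Int) (i + 1))).map (fun j => pyChAt t j (i - j))).flatten) (m.toList ++ o.toList ++ o.toList) : Int)
          + (PySem.Chars.count (((PySem.List.pyRange (max 0 (i - (((PySem.List.pyGet? t 0).getD "").toList.length : Int) + 1)) (min (t.length : Int) (i + 1))).map (fun j => pyChAt t j (i - j))).flatten) (o.toList ++ o.toList ++ m.toList) : Int))).sum = 0 := by
        have hz : ∀ i ∈ PySem.List.pyRange 0 ((t.length : Int) + (((PySem.List.pyGet? t 0).getD "").toList.length : Int) - 1),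
            (PySem.Chars.count (((PySem.List.pyRange (max 0 (i - (((PySem.List.pyGet? t 0).getD "").toList.length : Int) + 1)) (min (t.length : Int) (i + 1))).map (fun j => pyChAt t j (i - j))).flatten) (m.toList ++ o.toList ++ o.toList) : Int)
            + (PySem.Chars.count (((PySem.List.pyRange (max 0 (i - (((PySem.List.pyGet? t 0).getD "").toList.length : Int) + 1)) (min (t.length : Int) (i + 1))).map (fun j => pyChAt t j (i - j))).flatten) (o.toList ++ o.toList ++ m.toList) : Int) = 0 := by
          intro i _
          have hfl := flatten_len_le (PySem.List.pyRange (max 0 (i - (((PySem.List.pyGet? t 0).getD "").toList.length : Int) + 1)) (min (t.length : Int) (i + 1)))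
            (fun j => pyChAt t j (i - j)) (fun j => pyChAt_len_le t j (i - j))
          rw [PySem.List.length_pyRange_one] at hfl
          rw [count_short _ _ hpne1 (by rw [hplen1]; omega),
              count_short _ _ hpne2 (by rw [hplen2]; omega)]
          norm_num
        rw [List.map_congr_left hz]
        simp
      have hA4 : ((PySem.List.pyRange (1 - (t.length : Int)) (((PySem.List.pyGet? t 0).getD "").toList.length : Int)).map (fun i =>
          (PySem.Chars.count (((PySem.List.pyRange (max 0 (-i)) (min (t.length : Int) ((((PySem.List.pyGet? t 0).getD "").toList.length : Int) - i))).map (fun j => pyChAt t j (i + j))).flatten) (m.toList ++ o.toList ++ o.toList) : Int)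
          + (PySem.Chars.count (((PySem.List.pyRange (max 0 (-i)) (min (t.length : Int) ((((PySem.List.pyGet? t 0).getD "").toList.length : Int) - i))).map (fun j => pyChAt t j (i + j))).flatten) (o.toList ++ o.toList ++ m.toList) : Int))).sum = 0 := by
        have hz : ∀ i ∈ PySem.List.pyRange (1 - (t.length : Int)) (((PySem.List.pyGet? t 0).getD "").toList.length : Int),
            (PySem.Chars.count (((PySem.List.pyRange (max 0 (-i)) (min (t.length : Int) ((((PySem.List.pyGet? t 0).getD "").toList.length : Int) - i))).map (fun j => pyChAt t j (i + j))).flatten) (m.toList ++ o.toList ++ o.toList) : Int)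
            + (PySem.Chars.count (((PySem.List.pyRange (max 0 (-i)) (min (t.length : Int) ((((PySem.List.pyGet? t 0).getD "").toList.length : Int) - i))).map (fun j => pyChAt t j (i + j))).flatten) (o.toList ++ o.toList ++ m.toList) : Int) = 0 := by
          intro i _
          have hfl := flatten_len_le (PySem.List.pyRange (max 0 (-i)) (min (t.length : Int) ((((PySem.List.pyGet? t 0).getD "").toList.length : Int) - i)))
            (fun j => pyChAt t j (i + j)) (fun j => pyChAt_len_le t j (i + j))
          rw [PySem.List.length_pyRange_one] at hfl
          rw [count_short _ _ hpne1 (by rw [hplen1]; omega),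
              count_short _ _ hpne2 (by rw [hplen2]; omega)]
          norm_num
        rw [List.map_congr_left hz]
        simp
      rw [hA1, hA2, hA3, hA4]
      have hBrowss : ∀ init : Int, (PySem.List.pyRange 0 (t.length : Int)).foldl
          (fun total r => (PySem.List.pyRange 0 (((PySem.List.pyGetD t r "").toList.length : Int) - 2)).foldl
            (fun total j => (total + (if pyCh (PySem.List.pyGetD t r "").toList j = m.toList ∧ pyCh (PySem.List.pyGetD t r "").toList (j + 1) = o.toList ∧ pyCh (PySem.List.pyGetD t r "").toList (j + 2) = o.toList then (1 : Int) else 0)) + (if pyCh (PySem.List.pyGetD t r "").toList j = o.toList ∧ pyCh (PySem.List.pyGetD t r "").toList (j + 1) = o.toList ∧ pyCh (PySem.List.pyGetD t r "").toList (j + 2) = m.toList then (1 : Int) else 0))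
            total) init
          = init + ((PySem.List.pyRange 0 (t.length : Int)).map (fun r => ((PySem.List.pyRange 0 (((PySem.List.pyGetD t r "").toList.length : Int) - 2)).map (fun j => (if pyCh (PySem.List.pyGetD t r "").toList j = m.toList ∧ pyCh (PySem.List.pyGetD t r "").toList (j + 1) = o.toList ∧ pyCh (PySem.List.pyGetD t r "").toList (j + 2) = o.toList then (1 : Int) else 0) + (if pyCh (PySem.List.pyGetD t r "").toList j = o.toList ∧ pyCh (PySem.List.pyGetD t r "").toList (j + 1) = o.toList ∧ pyCh (PySem.List.pyGetD t r "").toList (j + 2) = m.toList then (1 : Int) else 0))).sum)).sum := by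
        intro init
        rw [PySem.List.foldl_congr_mem _ _ (fun (total : Int) (r : Int) => total + ((PySem.List.pyRange 0 (((PySem.List.pyGetD t r "").toList.length : Int) - 2)).map (fun j => (if pyCh (PySem.List.pyGetD t r "").toList j = m.toList ∧ pyCh (PySem.List.pyGetD t r "").toList (j + 1) = o.toList ∧ pyCh (PySem.List.pyGetD t r "").toList (j + 2) = o.toList then (1 : Int) else 0) + (if pyCh (PySem.List.pyGetD t r "").toList j = o.toList ∧ pyCh (PySem.List.pyGetD t r "").toList (j + 1) = o.toList ∧ pyCh (PySem.List.pyGetD t r "").toList (j + 2) = m.toList then (1 : Int) else 0))).sum) init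
          (fun acc r _ => foldl_add2 _ _ _ acc), PySem.List.foldl_add]
      have hBcolss : ∀ init : Int, (PySem.List.pyRange 0 (((PySem.List.pyGet? t 0).getD "").toList.length : Int)).foldl
          (fun total j => (PySem.List.pyRange 0 ((t.length : Int) - 2)).foldl
            (fun total r => (total + (if pyChAt t r j = m.toList ∧ pyChAt t (r + 1) j = o.toList ∧ pyChAt t (r + 2) j = o.toList then (1 : Int) else 0)) + (if pyChAt t r j = o.toList ∧ pyChAt t (r + 1) j = o.toList ∧ pyChAt t (r + 2) j = m.toList then (1 : Int) else 0)) total) init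
          = init + ((PySem.List.pyRange 0 (((PySem.List.pyGet? t 0).getD "").toList.length : Int)).map (fun j => ((PySem.List.pyRange 0 ((t.length : Int) - 2)).map (fun r => (if pyChAt t r j = m.toList ∧ pyChAt t (r + 1) j = o.toList ∧ pyChAt t (r + 2) j = o.toList then (1 : Int) else 0) + (if pyChAt t r j = o.toList ∧ pyChAt t (r + 1) j = o.toList ∧ pyChAt t (r + 2) j = m.toList then (1 : Int) else 0))).sum)).sum := by
        intro init
        rw [PySem.List.foldl_congr_mem _ _ (fun (total : Int) (j : Int) => total + ((PySem.List.pyRange 0 ((t.length : Int) - 2)).map (fun r => (if pyChAt t r j = m.toList ∧ pyChAt t (r + 1) j = o.toList ∧ pyChAt t (r + 2) j = o.toList then (1 : Int) else 0) + (if pyChAt t r j = o.toList ∧ pyChAt t (r + 1) j = o.toList ∧ pyChAt t (r + 2) j = m.toList then (1 : Int) else 0))).sum) init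
          (fun acc j _ => foldl_add2 _ _ _ acc), PySem.List.foldl_add]
      have hBdiags : ∀ init : Int, (PySem.List.pyRange 0 ((t.length : Int) - 2)).foldl
          (fun total r => (PySem.List.pyRange 0 ((((PySem.List.pyGet? t 0).getD "").toList.length : Int) - 2)).foldl
            (fun total j => (total + (if pyChAt t r j = m.toList ∧ pyChAt t (r + 1) (j + 1) = o.toList ∧ pyChAt t (r + 2) (j + 2) = o.toList then (1 : Int) else 0)) + (if pyChAt t r j = o.toList ∧ pyChAt t (r + 1) (j + 1) = o.toList ∧ pyChAt t (r + 2) (j + 2) = m.toList then (1 : Int) else 0))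
            ((PySem.List.pyRange 2 (((PySem.List.pyGet? t 0).getD "").toList.length : Int)).foldl
              (fun total j => (total + (if pyChAt t r j = m.toList ∧ pyChAt t (r + 1) (j - 1) = o.toList ∧ pyChAt t (r + 2) (j - 2) = o.toList then (1 : Int) else 0)) + (if pyChAt t r j = o.toList ∧ pyChAt t (r + 1) (j - 1) = o.toList ∧ pyChAt t (r + 2) (j - 2) = m.toList then (1 : Int) else 0)) total)) init
          = init + ((PySem.List.pyRange 0 ((t.length : Int) - 2)).map (fun r => ((PySem.List.pyRange 2 (((PySem.List.pyGet? t 0).getD "").toList.length : Int)).map (fun j => (if pyChAt t r j = m.toList ∧ pyChAt t (r + 1) (j - 1) = o.toList ∧ pyChAt t (r + 2) (j - 2) = o.toList then (1 : Int) else 0) + (if pyChAt t r j = o.toList ∧ pyChAt t (r + 1) (j - 1) = o.toList ∧ pyChAt t (r + 2) (j - 2) = m.toList then (1 : Int) else 0))).sum + ((PySem.List.pyRange 0 ((((PySem.List.pyGet? t 0).getD "").toList.length : Int) - 2)).map (fun j => (if pyChAt t r j = m.toList ∧ pyChAt t (r + 1) (j + 1) = o.toList ∧ pyChAt t (r + 2)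 (j + 2) = o.toList then (1 : Int) else 0) + (if pyChAt t r j = o.toList ∧ pyChAt t (r + 1) (j + 1) = o.toList ∧ pyChAt t (r + 2) (j + 2) = m.toList then (1 : Int) else 0))).sum)).sum := by
        intro init
        rw [PySem.List.foldl_congr_mem _ _ (fun (total : Int) (r : Int) => total + (((PySem.List.pyRange 2 (((PySem.List.pyGet? t 0).getD "").toList.length : Int)).map (fun j => (if pyChAt t r j = m.toList ∧ pyChAt t (r + 1) (j - 1) = o.toList ∧ pyChAt t (r + 2) (j - 2) = o.toList then (1 : Int) else 0) + (if pyChAt t r j = o.toList ∧ pyChAt t (r + 1) (j - 1) = o.toList ∧ pyChAt t (r + 2) (j - 2) = m.toList then (1 : Int) else 0))).sum + ((PySem.List.pyRange 0 ((((PySem.List.pyGet? t 0).getD "").toList.length : Int) - 2)).map (fun j => (if pyChAt t r j = m.toList ∧ pyChAt t (r + 1) (j + 1) = o.toList ∧ pyChAt t (r + 2) (j + 2) = o.toList then (1 : Int) else 0) + (if pyChAt t r j = o.toList ∧ pyChAt t (r + 1) (j + 1) = o.toList ∧ pyChAt t (r + 2) (j + 2) = m.toList then (1 : Int) else 0))).sum))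 init
          (fun acc r _ => by rw [foldl_add2, foldl_add2]; ring), PySem.List.foldl_add]
      rw [hBrowss, hBcolss, hBdiags]
      have hkill : ∀ x y z : List Char, x.length = 1 → y.length = 1 → z.length = 1 →
          (¬(x = m.toList ∧ y = o.toList ∧ z = o.toList) ∧
           ¬(x = o.toList ∧ y = o.toList ∧ z = m.toList)) := by
        intro x y z hx hy hz
        constructor
        · rintro ⟨c1, c2, c3⟩
          rcases hbad with hb | hb
          · exact hb (by rw [← c1]; exact hx)
          · exact hb (by rw [← c2]; exact hy)
        · rintro ⟨c1, c2, c3⟩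
          rcases hbad with hb | hb
          · exact hb (by rw [← c3]; exact hz)
          · exact hb (by rw [← c1]; exact hx)
      have hlat : ∀ (r j : Int), 0 ≤ r → r < (t.length : Int) → 0 ≤ j → j < (((PySem.List.pyGet? t 0).getD "").toList.length : Int) →
          (pyChAt t r j).length = 1 := by
        intro r j h0 h1 h2 h3
        rw [pyChAt_singleton t r j h0 h1 h2
          (lt_of_lt_of_le h3 (rowlen_ge t ((PySem.List.pyGet? t 0).getD "").toList.length hCle r h0 h1))]
        rfl
      have hB1 : ((PySem.List.pyRange 0 (t.length : Int)).map (fun r => ((PySem.List.pyRange 0 (((PySem.List.pyGetD t r "").toList.length : Int) - 2)).map (fun j => (if pyCh (PySem.List.pyGetD t r "").toList j = m.toList ∧ pyCh (PySem.List.pyGetD t r "").toList (j + 1) = o.toList ∧ pyCh (PySem.List.pyGetD t r "").toList (j + 2) = o.toList then (1 : Int) else 0) + (if pyCh (PySem.List.pyGetD t r "").toList j = o.toList ∧ pyCh (PySem.List.pyGetD t r "").toList (j + 1) = o.toList ∧ pyCh (PySem.List.pyGetD t r "").toList (j + 2) = m.toList then (1 : Int) else 0))).sum)).sum = 0 :=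 by
        have hz : ∀ r ∈ PySem.List.pyRange 0 (t.length : Int), ((PySem.List.pyRange 0 (((PySem.List.pyGetD t r "").toList.length : Int) - 2)).map (fun j => (if pyCh (PySem.List.pyGetD t r "").toList j = m.toList ∧ pyCh (PySem.List.pyGetD t r "").toList (j + 1) = o.toList ∧ pyCh (PySem.List.pyGetD t r "").toList (j + 2) = o.toList then (1 : Int) else 0) + (if pyCh (PySem.List.pyGetD t r "").toList j = o.toList ∧ pyCh (PySem.List.pyGetD t r "").toList (j + 1) = o.toList ∧ pyCh (PySem.List.pyGetD t r "").toList (j + 2) = m.toList then (1 : Int) else 0))).sum = 0 := by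
          intro r _
          have hz2 : ∀ j ∈ PySem.List.pyRange 0 (((PySem.List.pyGetD t r "").toList.length : Int) - 2),
              (if pyCh (PySem.List.pyGetD t r "").toList j = m.toList ∧ pyCh (PySem.List.pyGetD t r "").toList (j + 1) = o.toList ∧ pyCh (PySem.List.pyGetD t r "").toList (j + 2) = o.toList then (1 : Int) else 0) + (if pyCh (PySem.List.pyGetD t r "").toList j = o.toList ∧ pyCh (PySem.List.pyGetD t r "").toList (j + 1) = o.toList ∧ pyCh (PySem.List.pyGetD t r "").toList (j + 2) = m.toList then (1 : Int) else 0) = 0 := by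
            intro j hj
            rw [PySem.List.mem_pyRange_one] at hj
            have l1 : (pyCh (PySem.List.pyGetD t r "").toList j).length = 1 := by
              rw [pyCh_singleton _ _ (by omega) (by omega)]; rfl
            have l2 : (pyCh (PySem.List.pyGetD t r "").toList (j + 1)).length = 1 := by
              rw [pyCh_singleton _ _ (by omega) (by omega)]; rfl
            have l3 : (pyCh (PySem.List.pyGetD t r "").toList (j + 2)).length = 1 := by
              rw [pyCh_singleton _ _ (by omega) (by omega)]; rfl
            obtain ⟨k1, k2⟩ := hkill _ _ _ l1 l2 l3
            rw [if_neg k1, if_neg k2]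
            norm_num
          rw [List.map_congr_left hz2]
          simp
        rw [List.map_congr_left hz]
        simp
      have hB2 : ((PySem.List.pyRange 0 (((PySem.List.pyGet? t 0).getD "").toList.length : Int)).map (fun j => ((PySem.List.pyRange 0 ((t.length : Int) - 2)).map (fun r => (if pyChAt t r j = m.toList ∧ pyChAt t (r + 1) j = o.toList ∧ pyChAt t (r + 2) j = o.toList then (1 : Int) else 0) + (if pyChAt t r j = o.toList ∧ pyChAt t (r + 1) j = o.toList ∧ pyChAt t (r + 2) j = m.toList then (1 : Int) else 0))).sum)).sum = 0 := by
        have hz : ∀ j ∈ PySem.List.pyRange 0 (((PySem.List.pyGet? t 0).getD "").toList.length : Int), ((PySem.List.pyRange 0 ((t.length : Int) - 2)).map (fun r => (if pyChAt t r j = m.toList ∧ pyChAt t (r + 1) j = o.toList ∧ pyChAt t (r + 2) j = o.toList then (1 : Int) else 0) + (if pyChAt t r j = o.toList ∧ pyChAt t (r + 1) j = o.toList ∧ pyChAt t (r + 2) j = m.toList then (1 : Int) else 0))).sum = 0 := by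
          intro j hj
          rw [PySem.List.mem_pyRange_one] at hj
          have hz2 : ∀ r ∈ PySem.List.pyRange 0 ((t.length : Int) - 2),
              (if pyChAt t r j = m.toList ∧ pyChAt t (r + 1) j = o.toList ∧ pyChAt t (r + 2) j = o.toList then (1 : Int) else 0) + (if pyChAt t r j = o.toList ∧ pyChAt t (r + 1) j = o.toList ∧ pyChAt t (r + 2) j = m.toList then (1 : Int) else 0) = 0 := by
            intro r hr
            rw [PySem.List.mem_pyRange_one] at hr
            obtain ⟨k1, k2⟩ := hkill _ _ _ (hlat r j (by omega) (by omega) (by omega) (by omega))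
              (hlat (r + 1) j (by omega) (by omega) (by omega) (by omega))
              (hlat (r + 2) j (by omega) (by omega) (by omega) (by omega))
            rw [if_neg k1, if_neg k2]
            norm_num
          rw [List.map_congr_left hz2]
          simp
        rw [List.map_congr_left hz]
        simp
      have hB3 : ∀ r ∈ PySem.List.pyRange 0 ((t.length : Int) - 2), ((PySem.List.pyRange 2 (((PySem.List.pyGet? t 0).getD "").toList.length : Int)).map (fun j => (if pyChAt t r j = m.toList ∧ pyChAt t (r + 1) (j - 1) = o.toList ∧ pyChAt t (r + 2) (j - 2) = o.toList then (1 : Int) else 0) + (if pyChAt t r j = o.toList ∧ pyChAt t (r + 1) (j - 1) = o.toList ∧ pyChAt t (r + 2) (j - 2) = m.toList then (1 : Int) else 0))).sum + ((PySem.List.pyRange 0 ((((PySem.List.pyGet? t 0).getD "").toList.length : Int) - 2)).map (fun j => (if pyChAt t r j = m.toList ∧ pyChAt t (r + 1) (j + 1) = o.toList ∧ pyChAt t (r + 2) (j + 2) = o.toList then (1 : Int) else 0) + (if pyChAt t r j = o.toList ∧ pyChAt t (r + 1) (j + 1) = o.toList ∧ pyChAt t (r + 2) (j + 2) = m.toList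 then (1 : Int) else 0))).sum = 0 := by
        intro r hr
        rw [PySem.List.mem_pyRange_one] at hr
        have hza : ∀ j ∈ PySem.List.pyRange 2 (((PySem.List.pyGet? t 0).getD "").toList.length : Int), (if pyChAt t r j = m.toList ∧ pyChAt t (r + 1) (j - 1) = o.toList ∧ pyChAt t (r + 2) (j - 2) = o.toList then (1 : Int) else 0) + (if pyChAt t r j = o.toList ∧ pyChAt t (r + 1) (j - 1) = o.toList ∧ pyChAt t (r + 2) (j - 2) = m.toList then (1 : Int) else 0) = 0 := by
          intro j hj
          rw [PySem.List.mem_pyRange_one] at hj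
          obtain ⟨k1, k2⟩ := hkill _ _ _ (hlat r j (by omega) (by omega) (by omega) (by omega))
            (hlat (r + 1) (j - 1) (by omega) (by omega) (by omega) (by omega))
            (hlat (r + 2) (j - 2) (by omega) (by omega) (by omega) (by omega))
          rw [if_neg k1, if_neg k2]
          norm_num
        have hzm : ∀ j ∈ PySem.List.pyRange 0 ((((PySem.List.pyGet? t 0).getD "").toList.length : Int) - 2), (if pyChAt t r j = m.toList ∧ pyChAt t (r + 1) (j + 1) = o.toList ∧ pyChAt t (r + 2) (j + 2) = o.toList then (1 : Int) else 0) + (if pyChAt t r j = o.toList ∧ pyChAt t (r + 1) (j + 1) = o.toList ∧ pyChAt t (r + 2) (j + 2) = m.toList then (1 : Int) else 0) = 0 := by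
          intro j hj
          rw [PySem.List.mem_pyRange_one] at hj
          obtain ⟨k1, k2⟩ := hkill _ _ _ (hlat r j (by omega) (by omega) (by omega) (by omega))
            (hlat (r + 1) (j + 1) (by omega) (by omega) (by omega) (by omega))
            (hlat (r + 2) (j + 2) (by omega) (by omega) (by omega) (by omega))
          rw [if_neg k1, if_neg k2]
          norm_num
        rw [List.map_congr_left hza, List.map_congr_left hzm]
        simp
      have hB3' : ((PySem.List.pyRange 0 ((t.length : Int) - 2)).map (fun r => ((PySem.List.pyRange 2 (((PySem.List.pyGet? t 0).getD "").toList.length : Int)).map (fun j => (if pyChAt t r j = m.toList ∧ pyChAt t (r + 1) (j - 1) = o.toList ∧ pyChAt t (r + 2) (j - 2) = o.toList then (1 : Int) else 0) + (if pyChAt t r j = o.toList ∧ pyChAt t (r + 1) (j - 1) = o.toList ∧ pyChAt t (r + 2) (j - 2) = m.toList then (1 : Int) else 0))).sum + ((PySem.List.pyRange 0 ((((PySem.List.pyGet? t 0).getD "").toList.length : Int) - 2)).map (fun j => (if pyChAt t r j = m.toList ∧ pyChAt t (r + 1) (j + 1) = o.toList ∧ pyChAt t (r + 2) (j + 2) =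 o.toList then (1 : Int) else 0) + (if pyChAt t r j = o.toList ∧ pyChAt t (r + 1) (j + 1) = o.toList ∧ pyChAt t (r + 2) (j + 2) = m.toList then (1 : Int) else 0))).sum)).sum = 0 := by
        rw [List.map_congr_left hB3]
        simp
      rw [hB1, hB2, hB3']
      norm_num
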